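-- pv_equiv track=rewrite | github.com/timbuendert/relationship_explanation | classification/2_labels.py | list_duplicates
-- ===== SOURCE A (Python) =====
-- from collections import defaultdict, Counter
--
-- def list_duplicates(seq):
--     tally = defaultdict(list)
--     for i,item in enumerate(seq):
--         tally[item].append(i)
--     dup_dict = {}
--     for key,locs in tally.items():
--         if len(locs) > 1:
--             dup_dict[key] = locs
--     return dup_dict
-- ===== SOURCE B (Python) =====
-- def list_duplicates(seq):
--     items = list(seq)
--     dup_dict = {}
--     for item in dict.fromkeys(items):
--         locs = [i for i, x in enumerate(items) if x == item]
--         if len(locs) > 1: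
--             dup_dict[item] = locs
--     return dup_dict
-- ===== Notes on version B (the rewrite author's own statement) =====
-- stated objective: alternative
-- what changed: B loops over the distinct values in first-appearance order (dict.fromkeys) and rescans the materialized list once per value to collect that value's indices, instead of A's single hash-grouping pass over all indices followed by a filtering pass over the groups.
import Mathlib
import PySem

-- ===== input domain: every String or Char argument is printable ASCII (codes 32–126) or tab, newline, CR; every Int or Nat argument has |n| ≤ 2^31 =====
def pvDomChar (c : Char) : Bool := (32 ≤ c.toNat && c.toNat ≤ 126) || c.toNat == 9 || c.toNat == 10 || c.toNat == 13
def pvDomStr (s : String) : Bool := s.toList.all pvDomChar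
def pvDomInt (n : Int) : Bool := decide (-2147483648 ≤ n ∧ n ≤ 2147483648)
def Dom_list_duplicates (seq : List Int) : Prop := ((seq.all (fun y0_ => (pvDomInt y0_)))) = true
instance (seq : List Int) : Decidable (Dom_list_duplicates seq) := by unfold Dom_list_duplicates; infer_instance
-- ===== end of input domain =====

-- B iterates the distinct values in first-appearance order and rescans the list once per value,
-- instead of A's hash-grouping pass plus filtering pass; a different traversal of the same data ("alternative").

-- ===== PORT A =====
-- tally = defaultdict(list); for i,item in enumerate(seq): tally[item].append(i)
-- dup_dict = {}; for key,locs in tally.items(): if len(locs) > 1: dup_dict[key] = locs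
def list_duplicates (seq : List Int) : List (Int × List Int) :=
  let tally := (PySem.List.enumerate seq 0).foldl
    (fun d p => d.modify p.2 [] (· ++ [p.1])) PySem.Dict.empty
  let dup_dict := tally.items.foldl
    (fun d p => if p.2.length > 1 then d.insert p.1 p.2 else d) PySem.Dict.empty
  dup_dict.items

-- ===== PORT B =====
-- items = list(seq); for item in dict.fromkeys(items):           (distinct values, first-appearance order)
--   locs = [i for i, x in enumerate(items) if x == item]
--   if len(locs) > 1: dup_dict[item] = locs
def list_duplicates_alt (seq : List Int) : List (Int × List Int) :=
  let distinct := PySem.Set.ofList seq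
  let dup_dict := distinct.foldl
    (fun d item =>
      let locs := ((PySem.List.enumerate seq 0).filter (fun p => p.2 == item)).map (·.1)
      if locs.length > 1 then d.insert item locs else d)
    PySem.Dict.empty
  dup_dict.items

-- ===== PRECONDITION & SPEC =====
def Spec_list_duplicates (seq : List Int) (out : List (Int × List Int)) : Prop := out = list_duplicates_alt seq
instance (seq : List Int) (out : List (Int × List Int)) : Decidable (Spec_list_duplicates seq out) := by unfold Spec_list_duplicates; infer_instance

-- ===== CLAIM =====
def Claim_equal_list_duplicates : Prop := ∀ (seq : List Int), Dom_list_duplicates seq → Spec_list_duplicates seq (list_duplicates seq)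

-- ===== LEMMAS AND PROOFS =====

-- the grouping loop keyed by the pair's SECOND component (A's tally[item].append(i))
theorem getD_foldl_modify_snd (l : List (Int × Int)) (d : PySem.Dict Int (List Int)) (c : Int) :
    (l.foldl (fun d p => d.modify p.2 [] (· ++ [p.1])) d).getD c []
      = d.getD c [] ++ (l.filter (fun p => p.2 == c)).map (·.1) := by
  induction l generalizing d with
  | nil => simp
  | cons p t ih =>
    simp only [List.foldl_cons, ih, List.filter_cons]
    by_cases h : p.2 = c
    · simp [h, List.append_assoc]
    · simp [PySem.Dict.getD_modify, h, Ne.symm h]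

-- a fold inserting at pairwise-distinct keys fresh for d appends the kept pairs
theorem items_foldl_insert_if (l : List (Int × List Int)) (d : PySem.Dict Int (List Int))
    (hnd : (l.map (·.1)).Nodup) (hfresh : ∀ p ∈ l, d.contains p.1 = false) :
    (l.foldl (fun d p => if p.2.length > 1 then d.insert p.1 p.2 else d) d).items
      = d.items ++ l.filter (fun p => decide (p.2.length > 1)) := by
  induction l generalizing d with
  | nil => simp
  | cons p t ih =>
    simp only [List.map_cons, List.nodup_cons] at hnd
    simp only [List.foldl_cons, List.filter_cons]
    by_cases h : p.2.length > 1
    · have hf : d.contains p.1 = false := hfresh p (by simp)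
      have hfresh' : ∀ q ∈ t, (d.insert p.1 p.2).contains q.1 = false := by
        intro q hq
        rw [PySem.Dict.contains_insert]
        have hne : q.1 ≠ p.1 := fun he => hnd.1 (he ▸ List.mem_map_of_mem hq)
        simp [hne, hfresh q (List.mem_cons_of_mem _ hq)]
      rw [if_pos h, ih _ hnd.2 hfresh', PySem.Dict.items_insert_of_not_contains (h := hf)]
      simp [h]
    · rw [if_neg h, ih _ hnd.2 (fun q hq => hfresh q (List.mem_cons_of_mem _ hq))]
      simp [h]

theorem main_eq (seq : List Int) : list_duplicates seq = list_duplicates_alt seq := by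
  set e := PySem.List.enumerate seq 0 with he
  set idx : Int → List Int := fun k => (e.filter (fun p => p.2 == k)).map (·.1) with hidx
  set pairs := (PySem.Set.ofList seq).map (fun k => (k, idx k)) with hpairs
  have hndk : (pairs.map (·.1)).Nodup := by
    have : pairs.map (·.1) = PySem.Set.ofList seq := by
      rw [hpairs, List.map_map]
      have hc : ((fun x : Int × List Int => x.1) ∘ fun k => (k, idx k)) = id := rfl
      rw [hc, List.map_id]
    rw [this]; exact PySem.Set.nodup_ofList seq
  -- ===== A side =====
  set tally := e.foldl (fun d p => d.modify p.2 [] (· ++ [p.1])) PySem.Dict.empty with ht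
  have hkeys : tally.keys = PySem.Set.ofList seq := by
    rw [ht, PySem.Dict.keys_foldl_modify_key]
    simp only [PySem.Set.update, PySem.Set.ofList_eq_foldl, PySem.Dict.keys_empty]
    rw [show List.map Prod.snd e = seq from PySem.List.map_snd_enumerate seq 0]
  have hnd : tally.keys.Nodup := by
    rw [hkeys]; exact PySem.Set.nodup_ofList seq
  have hitems : tally.items = pairs := by
    rw [PySem.Dict.items_eq_map_keys tally hnd [], hkeys, hpairs]
    apply List.map_congr_left
    intro k _
    rw [ht, getD_foldl_modify_snd]
    simp [PySem.Dict.getD_empty, hidx]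
  have hA : list_duplicates seq = pairs.filter (fun p => decide (p.2.length > 1)) := by
    show (tally.items.foldl (fun d p => if p.2.length > 1 then d.insert p.1 p.2 else d)
        PySem.Dict.empty).items = _
    rw [hitems,
        items_foldl_insert_if pairs PySem.Dict.empty hndk
          (by intro p _; simp [PySem.Dict.contains_empty])]
    simp [PySem.Dict.empty]
  -- ===== B side =====
  have hB : list_duplicates_alt seq = pairs.filter (fun p => decide (p.2.length > 1)) := by
    show ((PySem.Set.ofList seq).foldl
        (fun d item =>
          let locs := ((PySem.List.enumerate seq 0).filter (fun p => p.2 == item)).map (·.1)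
          if locs.length > 1 then d.insert item locs else d)
        PySem.Dict.empty).items = _
    have hfold : (PySem.Set.ofList seq).foldl
        (fun d item =>
          let locs := ((PySem.List.enumerate seq 0).filter (fun p => p.2 == item)).map (·.1)
          if locs.length > 1 then d.insert item locs else d)
        PySem.Dict.empty
        = pairs.foldl (fun d p => if p.2.length > 1 then d.insert p.1 p.2 else d)
            PySem.Dict.empty := by
      rw [hpairs, List.foldl_map]
    rw [hfold,
        items_foldl_insert_if pairs PySem.Dict.empty hndk
          (by intro p _; simp [PySem.Dict.contains_empty])]
    simp [PySem.Dict.empty]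
  rw [hA, hB]

-- ===== VERDICT =====
theorem list_duplicates_spec : Claim_equal_list_duplicates := by
  intro seq _
  unfold Spec_list_duplicates
  exact main_eq seq
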